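-- pv_equiv track=rewrite | github.com/LAIYEN-TING/2026-python | weeks/week-03/solutions/1114405035/uva490.py | rotate_text_90_degrees
-- ===== SOURCE A (Python) =====
-- from typing import List
--
-- def rotate_text_90_degrees(lines: List[str]) -> List[str]:
--     """將文字旋轉 90 度"""
--     if not lines:
--         return []
--
--     # 找到最長行的長度
--     max_length = max(len(line.rstrip()) for line in lines)
--
--     # 將每一行補齊到相同長度
--     padded_lines = [line.rstrip().ljust(max_length) for line in lines]
--
--     # 旋轉
--     rotated = []
--     for col in range(max_length):
--         new_line = ''
--         for row in range(len(padded_lines) - 1, -1, -1):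
--             new_line += padded_lines[row][col]
--         rotated.append(new_line.rstrip())
--
--     return rotated
-- ===== SOURCE B (Python) =====
-- from typing import List
--
-- def rotate_text_90_degrees(lines: List[str]) -> List[str]:
--     """Rotate a text block 90 degrees clockwise.
--
--     Single bottom-up sweep over the rows: each column keeps a (committed,
--     pending-whitespace) buffer pair; whitespace is buffered and only committed
--     when a later non-whitespace character arrives, so no padded copy of the
--     block is built and no final rstrip pass is needed."""
--     if not lines:
--         return []
--     stripped = [line.rstrip() for line in lines]
--     width = max(len(s) for s in stripped)
--     cols = [([], []) for _ in range(width)]  # (committed chars, pending whitespace) per column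
--     for s in reversed(stripped):
--         for j, (done, pend) in enumerate(cols):
--             ch = s[j] if j < len(s) else ' '
--             if ch.isspace():
--                 pend.append(ch)
--             else:
--                 done.extend(pend)
--                 pend.clear()
--                 done.append(ch)
--     return [''.join(done) for done, _ in cols]
-- ===== Notes on version B (the rewrite author's own statement) =====
-- stated objective: alternative
-- what changed: Replaces pad-then-gather-then-rstrip (pad every row to max width, collect each column bottom-up, rstrip each result) with a single bottom-up streaming sweep that keeps a (committed, pending-whitespace) pair per column, buffering whitespace and committing it only when a later non-whitespace character arrives, so no padded copy of the block and no final rstrip pass exist.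
import Mathlib
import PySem

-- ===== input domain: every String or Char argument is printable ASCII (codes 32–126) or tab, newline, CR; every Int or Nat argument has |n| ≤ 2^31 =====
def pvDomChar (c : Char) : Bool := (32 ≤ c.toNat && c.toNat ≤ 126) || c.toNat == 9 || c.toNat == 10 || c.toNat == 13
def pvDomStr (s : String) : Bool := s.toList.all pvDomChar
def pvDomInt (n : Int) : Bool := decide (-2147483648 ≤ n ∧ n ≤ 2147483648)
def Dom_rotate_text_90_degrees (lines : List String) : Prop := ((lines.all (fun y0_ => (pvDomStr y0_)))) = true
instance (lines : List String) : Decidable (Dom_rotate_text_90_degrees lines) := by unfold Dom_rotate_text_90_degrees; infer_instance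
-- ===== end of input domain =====

-- B replaces A's pad-then-gather-then-rstrip (pad every row, collect each column bottom-up, rstrip
-- the result) with a single bottom-up sweep keeping a (committed, pending-whitespace) pair per
-- column: whitespace is buffered and committed only when a later non-whitespace character arrives,
-- so no padded copy of the block is built and no final rstrip pass exists.

-- hand port of str.ljust(w): pad on the right with spaces to width w (exact: Python pads with ' ', no-op when w ≤ len)
def pyLjust (cs : List Char) (w : Int) : List Char := cs ++ List.replicate (w.toNat - cs.length) ' '

-- ===== PORT A =====
-- max(...) over the nonempty generator is PySem.List.maxD (default never used: the guard above rules out []);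
-- indexing padded_lines[row][col] is always in range, ported with PySem.List.pyGetD
def rotate_text_90_degrees (lines : List String) : List String :=
  if lines = [] then []
  else
    let max_length : Int :=
      PySem.List.maxD (lines.map (fun line => PySem.Chars.len (PySem.Chars.rstrip line.toList))) (fun x => x) 0
    let padded_lines : List (List Char) :=
      lines.map (fun line => pyLjust (PySem.Chars.rstrip line.toList) max_length)
    (PySem.List.pyRange 0 max_length 1).foldl (fun rotated col =>
      let new_line : List Char :=
        (PySem.List.pyRange ((padded_lines.length : Int) - 1) (-1) (-1)).foldl
          (fun nl row => nl ++ [PySem.List.pyGetD (PySem.List.pyGetD padded_lines row []) col ' '])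
          []
      rotated ++ [String.ofList (PySem.Chars.rstrip new_line)]) []

-- ===== PORT B =====
-- port of B's `s[j] if j < len(s) else ' '` (the in-range index via PySem.List.pyGetD, exact there)
def bChar (s : List Char) (j : Int) : Char :=
  if j < PySem.Chars.len s then PySem.List.pyGetD s j ' ' else ' '

-- B's inner loop mutates the j-th (done, pend) buffer pair in place; ported as the elementwise
-- rebuild of the cols list (same traversal, same per-column values)
def rotate_text_90_degrees_alt (lines : List String) : List String :=
  if lines = [] then []
  else
    let stripped : List (List Char) := lines.map (fun line => PySem.Chars.rstrip line.toList)
    let width : Int := PySem.List.maxD (stripped.map (fun s => PySem.Chars.len s)) (fun x => x) 0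
    let cols0 : List (List Char × List Char) := List.replicate width.toNat ([], [])
    let cols := stripped.reverse.foldl (fun cols s =>
      (PySem.List.enumerate cols).foldl (fun nxt jp =>
        let ch := bChar s jp.1
        if PySem.Chars.isspace ch then nxt ++ [(jp.2.1, jp.2.2 ++ [ch])]
        else nxt ++ [(jp.2.1 ++ jp.2.2 ++ [ch], [])]) []) cols0
    cols.map (fun p => String.ofList p.1)

-- ===== PRECONDITION & SPEC =====
def Spec_rotate_text_90_degrees (lines : List String) (out : List String) : Prop := out = rotate_text_90_degrees_alt lines
instance (lines : List String) (out : List String) : Decidable (Spec_rotate_text_90_degrees lines out) := by unfold Spec_rotate_text_90_degrees; infer_instance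

-- ===== CLAIM (what is proved, stated in full; the proofs are below) =====
def Claim_equal_rotate_text_90_degrees : Prop := ∀ (lines : List String), Dom_rotate_text_90_degrees lines → Spec_rotate_text_90_degrees lines (rotate_text_90_degrees lines)

-- ===== LEMMAS AND PROOFS =====

-- the per-column transition of B's sweep, abstracted out of the inner loop
def stepP (ch : Char) (p : List Char × List Char) : List Char × List Char :=
  if PySem.Chars.isspace ch then (p.1, p.2 ++ [ch]) else (p.1 ++ p.2 ++ [ch], [])

-- B's outer-loop body, named for the proofs (definitionally equal to the lambda in the port)
def outerF (cols : List (List Char × List Char)) (s : List Char) : List (List Char × List Char) :=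
  (PySem.List.enumerate cols).foldl (fun nxt jp =>
    let ch := bChar s jp.1
    if PySem.Chars.isspace ch then nxt ++ [(jp.2.1, jp.2.2 ++ [ch])]
    else nxt ++ [(jp.2.1 ++ jp.2.2 ++ [ch], [])]) []

theorem inner_eq (s : List Char) (cols : List (List Char × List Char)) :
    outerF cols s = (PySem.List.enumerate cols).map (fun jp => stepP (bChar s jp.1) jp.2) := by
  unfold outerF
  have h : (fun (nxt : List (List Char × List Char)) (jp : Int × (List Char × List Char)) =>
      let ch := bChar s jp.1
      if PySem.Chars.isspace ch then nxt ++ [(jp.2.1, jp.2.2 ++ [ch])]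
      else nxt ++ [(jp.2.1 ++ jp.2.2 ++ [ch], [])])
      = (fun nxt jp => nxt ++ [stepP (bChar s jp.1) jp.2]) := by
    funext nxt jp
    simp only [stepP]
    split <;> rfl
  rw [h, PySem.List.foldl_append_singleton_eq_map, List.nil_append]

theorem rstrip_concat (cs : List Char) (ch : Char) :
    PySem.Chars.rstrip (cs ++ [ch]) =
      if PySem.Chars.isspace ch then PySem.Chars.rstrip cs else cs ++ [ch] := by
  simp only [PySem.Chars.rstrip, List.reverse_append, List.reverse_singleton,
    List.singleton_append, List.dropWhile_cons]
  split <;> simp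

theorem rstrip_prefix (cs : List Char) : PySem.Chars.rstrip cs <+: cs := by
  have h := List.dropWhile_suffix (l := cs.reverse) PySem.Chars.isspace
  have h2 := h.reverse
  rwa [List.reverse_reverse] at h2

theorem rstrip_append_drop (cs : List Char) :
    PySem.Chars.rstrip cs ++ cs.drop (PySem.Chars.rstrip cs).length = cs := by
  have h := (List.prefix_iff_eq_take).mp (rstrip_prefix cs)
  have hle := (rstrip_prefix cs).length_le
  rw [h, List.length_take, min_eq_left hle, List.take_append_drop]

theorem colfold (cs : List Char) :
    cs.foldl (fun p ch => stepP ch p) (([], []) : List Char × List Char)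
      = (PySem.Chars.rstrip cs, cs.drop (PySem.Chars.rstrip cs).length) := by
  induction cs using List.reverseRecOn with
  | nil => simp [PySem.Chars.rstrip]
  | append_singleton cs ch ih =>
    rw [List.foldl_concat, ih, rstrip_concat]
    by_cases h : PySem.Chars.isspace ch
    · simp only [stepP, h, if_pos]
      rw [List.drop_append_of_le_length (rstrip_prefix cs).length_le]
    · simp only [stepP, h, Bool.false_eq_true, if_false]
      rw [rstrip_append_drop, List.drop_length]

theorem outer_inv (l : List (List Char)) :
    ∀ (cols : List (List Char × List Char)) (q : Nat → List Char × List Char),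
    (∀ j : Nat, j < cols.length → cols[j]? = some (q j)) →
    (l.foldl outerF cols).length = cols.length ∧
    ∀ j : Nat, j < cols.length →
      (l.foldl outerF cols)[j]? = some (l.foldl (fun p s => stepP (bChar s (j : Int)) p) (q j)) := by
  induction l with
  | nil =>
    intro cols q hq
    refine ⟨rfl, fun j hj => ?_⟩
    simp only [List.foldl_nil]
    exact hq j hj
  | cons s l ih =>
    intro cols q hq
    have hlen : (outerF cols s).length = cols.length := by
      rw [inner_eq, List.length_map, PySem.List.length_enumerate]
    have hget : ∀ j : Nat, j < (outerF cols s).length →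
        (outerF cols s)[j]? = some (stepP (bChar s (j : Int)) (q j)) := by
      intro j hj
      rw [hlen] at hj
      rw [inner_eq, List.getElem?_map, PySem.List.getElem?_enumerate, hq j hj]
      simp
    have := ih (outerF cols s) (fun j => stepP (bChar s (j : Int)) (q j)) (by
      intro j hj; exact hget j hj)
    rw [hlen] at this
    exact ⟨this.1, fun j hj => this.2 j hj⟩

theorem map_getD_range {α β : Type} (l : List α) (f : α → β) (d : α) :
    (List.range l.length).map (fun i => f (l.getD i d)) = l.map f := by
  induction l with
  | nil => simp
  | cons x t ih =>
    simp only [List.length_cons, List.range_succ_eq_map, List.map_cons, List.map_map]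
    refine congrArg₂ _ rfl ?_
    simpa [Function.comp] using ih

theorem gather_eq (padded : List (List Char)) (col : Int) :
    (PySem.List.pyRange ((padded.length : Int) - 1) (-1) (-1)).foldl
        (fun nl row => nl ++ [PySem.List.pyGetD (PySem.List.pyGetD padded row []) col ' '])
        []
      = padded.reverse.map (fun r => PySem.List.pyGetD r col ' ') := by
  have h1 : PySem.List.pyRange ((padded.length : Int) - 1) (-1) (-1)
      = (PySem.List.pyRange 0 (padded.length : Int)).reverse := by
    rw [PySem.List.pyRange_neg_one_eq_reverse]
    norm_num
  rw [h1, PySem.List.pyRange_zero_natCast, PySem.List.foldl_append_singleton_eq_map,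
    List.nil_append, List.map_reverse, List.map_map, List.map_reverse]
  congr 1
  rw [← map_getD_range padded (fun r => PySem.List.pyGetD r col ' ') []]
  apply List.map_congr_left
  intro i _
  simp

theorem pad_get (s : List Char) (M : Int) (hs : (s.length : Int) ≤ M) (k : Nat) (hk : (k : Int) < M) :
    PySem.List.pyGetD (pyLjust s M) (k : Int) ' ' = bChar s (k : Int) := by
  rw [PySem.List.pyGetD_natCast]
  unfold pyLjust bChar
  rw [PySem.List.pyGetD_natCast, PySem.Chars.len_eq]
  by_cases h : k < s.length
  · rw [List.getD_eq_getElem?_getD, List.getElem?_append_left h, if_pos (by exact_mod_cast h)]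
    rw [List.getD_eq_getElem?_getD, List.getElem?_eq_getElem h]
  · rw [List.getD_eq_getElem?_getD, List.getElem?_append_right (by omega), List.getElem?_replicate,
      if_pos (by omega), if_neg (by omega)]
    rfl

theorem main_eq (lines : List String) :
    rotate_text_90_degrees lines = rotate_text_90_degrees_alt lines := by
  by_cases hnil : lines = []
  · simp [rotate_text_90_degrees, rotate_text_90_degrees_alt, hnil]
  · unfold rotate_text_90_degrees rotate_text_90_degrees_alt
    rw [if_neg hnil, if_neg hnil]
    simp only [List.map_map]
    set M := PySem.List.maxD (lines.map (fun line => PySem.Chars.len (PySem.Chars.rstrip line.toList))) (fun x => x) 0 with hM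
    have hcomp : List.map ((fun s => PySem.Chars.len s) ∘ fun line => PySem.Chars.rstrip line.toList) lines
        = List.map (fun line => PySem.Chars.len (PySem.Chars.rstrip line.toList)) lines := rfl
    rw [hcomp, ← hM]
    have hne : List.map (fun line => PySem.Chars.len (PySem.Chars.rstrip line.toList)) lines ≠ [] := by
      simpa using hnil
    have hmem : ∀ l ∈ lines, PySem.Chars.len (PySem.Chars.rstrip l.toList) ≤ M := by
      intro l hl
      exact PySem.List.max?_isMax (PySem.List.max?_eq_some_maxD _ (fun x => x) 0 hne) _
        (List.mem_map_of_mem hl)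
    have hM0 : 0 ≤ M := by
      obtain ⟨l, hl⟩ := List.exists_mem_of_ne_nil lines hnil
      have h1 := hmem l hl
      rw [PySem.Chars.len_eq] at h1
      omega
    set n := M.toNat with hn
    have hMn : M = (n : Int) := by omega
    set stripped := lines.map (fun line => PySem.Chars.rstrip line.toList) with hstr
    set padded := lines.map (fun line => pyLjust (PySem.Chars.rstrip line.toList) M) with hpadded
    -- A side: normal form as a map over the column range
    rw [hMn, PySem.List.pyRange_zero_natCast, PySem.List.foldl_append_singleton_eq_map,
      List.nil_append, List.map_map]
    -- B side: name the outer-loop body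
    have hF : (fun (cols : List (List Char × List Char)) (s : List Char) =>
        (PySem.List.enumerate cols).foldl (fun nxt jp =>
          let ch := bChar s jp.1
          if PySem.Chars.isspace ch then nxt ++ [(jp.2.1, jp.2.2 ++ [ch])]
          else nxt ++ [(jp.2.1 ++ jp.2.2 ++ [ch], [])]) []) = outerF := rfl
    rw [hF]
    have hinv := outer_inv stripped.reverse (List.replicate n (([], []) : List Char × List Char))
      (fun _ => ([], [])) (by
        intro j hj
        rw [List.length_replicate] at hj
        rw [List.getElem?_replicate, if_pos hj])
    rw [List.length_replicate] at hinv
    apply List.ext_getElem?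
    intro i
    rw [List.getElem?_map, List.getElem?_map]
    by_cases hi : i < n
    · rw [List.getElem?_range hi, hinv.2 i hi]
      simp only [Option.map_some, Function.comp_apply]
      rw [gather_eq]
      have hfold : stripped.reverse.foldl (fun p s => stepP (bChar s (i : Int)) p) ([], [])
          = (stripped.reverse.map (fun s => bChar s (i : Int))).foldl (fun p ch => stepP ch p) ([], []) := by
        rw [List.foldl_map]
      rw [hfold, colfold]
      have hpad2 : padded = stripped.map (fun s => pyLjust s M) := by
        rw [hpadded, hstr, List.map_map]
        rfl
      have hcol : padded.reverse.map (fun r => PySem.List.pyGetD r (i : Int) ' ')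
          = stripped.reverse.map (fun s => bChar s (i : Int)) := by
        rw [hpad2, List.map_reverse, List.map_map, ← List.map_reverse]
        apply List.map_congr_left
        intro s hs
        rw [List.mem_reverse, hstr] at hs
        obtain ⟨line, hline, rfl⟩ := List.mem_map.mp hs
        have hlen := hmem line hline
        rw [PySem.Chars.len_eq] at hlen
        exact pad_get _ M hlen i (by omega)
      rw [hcol]
    · rw [List.getElem?_eq_none (by rw [List.length_range]; omega),
        List.getElem?_eq_none (by rw [hinv.1]; omega)]
      rfl

-- ===== VERDICT (by name: the statement is the Claim_ definition above) =====
theorem rotate_text_90_degrees_spec : Claim_equal_rotate_text_90_degrees := by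
  intro lines _
  unfold Spec_rotate_text_90_degrees
  exact main_eq lines
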